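-- pv_equiv track=rewrite | github.com/HaruParo/ConsciousBuyer | conscious-cart-coach/src/data_processing/rules.py | score_packaging
-- ===== SOURCE A (Python) =====
-- PACKAGING_SCORES = {
--     # Excellent - reusable/recyclable
--     "glass": 10,
--     "metal": 10,
--     "aluminum": 10,
--     # Good - recyclable/biodegradable
--     "paper": 8,
--     "cardboard": 8,
--     "carton": 7,
--     # Moderate - some recyclability
--     "minimal plastic": 6,
--     "recyclable plastic": 5,
--     "bioplastic": 5,
--     # Poor - difficult to recycle
--     "plastic": 3,
--     "mixed materials": 3,
--     "polystyrene": 1,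
--     "styrofoam": 1,
-- }
--
-- DEFAULT_PACKAGING_SCORE = 4
--
-- def score_packaging(packaging_str: str) -> int:
--     """
--     Score packaging based on material sustainability.
--
--     Args:
--         packaging_str: Packaging description string (e.g., "glass jar", "plastic bag")
--
--     Returns:
--         Integer score (1-10, higher = more sustainable)
--     """
--     if not packaging_str:
--         return DEFAULT_PACKAGING_SCORE
--
--     packaging_lower = packaging_str.lower()
--
--     # Check for each material keyword, collect all matches
--     matched_scores = []
--     for material, score in PACKAGING_SCORES.items():
--         if material in packaging_lower:
--             matched_scores.append(score)
--
--     if not matched_scores: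
--         return DEFAULT_PACKAGING_SCORE
--
--     # If we have mixed materials, return the best score
--     # (assumption: if glass + plastic, the main container is glass)
--     return max(matched_scores)
-- ===== SOURCE B (Python) =====
-- DEFAULT_PACKAGING_SCORE = 4
--
-- def score_packaging(packaging_str: str) -> int:
--     # Tier cascade: test score bands from best to worst; the first band with
--     # any keyword present is the max of all matches, so it is the answer.
--     if not packaging_str:
--         return DEFAULT_PACKAGING_SCORE
--     s = packaging_str.lower()
--     if "glass" in s or "metal" in s or "aluminum" in s:
--         return 10
--     if "paper" in s or "cardboard" in s:
--         return 8
--     if "carton" in s: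
--         return 7
--     if "minimal plastic" in s:
--         return 6
--     if "recyclable plastic" in s or "bioplastic" in s:
--         return 5
--     if "plastic" in s or "mixed materials" in s:
--         return 3
--     if "polystyrene" in s or "styrofoam" in s:
--         return 1
--     return DEFAULT_PACKAGING_SCORE
-- ===== Notes on version B (the rewrite author's own statement) =====
-- stated objective: simpler
-- what changed: Replaces the dict-driven gather-all-matches-then-max loop with a table-free cascade of score tiers tested best-to-worst, returning at the first tier with any keyword present (no dict, no accumulator list, no max call).
import Mathlib
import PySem

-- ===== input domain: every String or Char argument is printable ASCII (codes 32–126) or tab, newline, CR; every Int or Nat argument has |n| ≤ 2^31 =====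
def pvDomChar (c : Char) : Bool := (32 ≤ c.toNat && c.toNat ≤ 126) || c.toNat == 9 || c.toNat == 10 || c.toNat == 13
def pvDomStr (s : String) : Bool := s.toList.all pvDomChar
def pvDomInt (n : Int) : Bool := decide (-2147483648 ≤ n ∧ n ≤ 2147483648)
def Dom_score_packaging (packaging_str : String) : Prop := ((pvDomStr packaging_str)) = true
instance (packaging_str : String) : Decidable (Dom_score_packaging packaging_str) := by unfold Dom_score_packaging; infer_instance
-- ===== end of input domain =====

-- B replaces the dict-driven gather-then-max loop with a best-to-worst tier cascade (simpler; same results).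

-- ===== PORT A =====
def PACKAGING_SCORES : List (String × Int) :=
  [("glass", 10), ("metal", 10), ("aluminum", 10),
   ("paper", 8), ("cardboard", 8), ("carton", 7),
   ("minimal plastic", 6), ("recyclable plastic", 5), ("bioplastic", 5),
   ("plastic", 3), ("mixed materials", 3), ("polystyrene", 1), ("styrofoam", 1)]

def DEFAULT_PACKAGING_SCORE : Int := 4

def score_packaging (packaging_str : String) : Int :=
  if packaging_str = "" then DEFAULT_PACKAGING_SCORE
  else
    let packaging_lower := PySem.Str.lower packaging_str
    let matched_scores :=
      PACKAGING_SCORES.foldl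
        (fun acc ms => if PySem.Str.isIn ms.1 packaging_lower then acc ++ [ms.2] else acc) []
    if matched_scores = [] then DEFAULT_PACKAGING_SCORE
    else (PySem.List.max? matched_scores (fun y => y)).getD 0

-- ===== PORT B =====
def score_packaging_alt (packaging_str : String) : Int :=
  if packaging_str = "" then 4
  else
    let s := PySem.Str.lower packaging_str
    if PySem.Str.isIn "glass" s || PySem.Str.isIn "metal" s || PySem.Str.isIn "aluminum" s then 10
    else if PySem.Str.isIn "paper" s || PySem.Str.isIn "cardboard" s then 8
    else if PySem.Str.isIn "carton" s then 7
    else if PySem.Str.isIn "minimal plastic" s then 6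
    else if PySem.Str.isIn "recyclable plastic" s || PySem.Str.isIn "bioplastic" s then 5
    else if PySem.Str.isIn "plastic" s || PySem.Str.isIn "mixed materials" s then 3
    else if PySem.Str.isIn "polystyrene" s || PySem.Str.isIn "styrofoam" s then 1
    else 4

-- ===== PRECONDITION & SPEC =====
def Spec_score_packaging (packaging_str : String) (out : Int) : Prop := out = score_packaging_alt packaging_str
instance (packaging_str : String) (out : Int) : Decidable (Spec_score_packaging packaging_str out) := by unfold Spec_score_packaging; infer_instance

-- ===== CLAIM (what is proved, stated in full; the proofs are below) =====
def Claim_equal_score_packaging : Prop := ∀ (packaging_str : String), Dom_score_packaging packaging_str → Spec_score_packaging packaging_str (score_packaging packaging_str)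

-- ===== LEMMAS AND PROOFS =====

-- Proof-only bridge: first hit on a priority-ordered list.
def firstHit (l : List (String × Int)) (low : String) : Int :=
  match l with
  | [] => 4
  | ms :: rest => if PySem.Str.isIn ms.1 low then ms.2 else firstHit rest low

-- A's accumulator loop is the filtered score list.
theorem matched_eq (p : String × Int → Bool) (l : List (String × Int)) (a : List Int) :
    l.foldl (fun acc ms => if p ms then acc ++ [ms.2] else acc) a
      = a ++ (l.filter p).map Prod.snd := by
  induction l generalizing a with
  | nil => simp
  | cons x t ih =>
    simp only [List.foldl_cons, List.filter_cons]
    by_cases h : p x = true <;> simp [h, ih]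

theorem foldl_max_of_le (x : Int) (t : List Int) (h : ∀ y ∈ t, y ≤ x) :
    t.foldl max x = x := by
  induction t with
  | nil => rfl
  | cons y s ih =>
    simp only [List.foldl_cons]
    rw [max_eq_left (h y (by simp))]
    exact ih (fun z hz => h z (by simp [hz]))

-- On a score-nonincreasing list, gather-then-max equals the first hit.
theorem key_lemma (low : String) (l : List (String × Int))
    (hs : l.Pairwise (fun a b => b.2 ≤ a.2)) :
    (let matched := (l.filter (fun ms => PySem.Str.isIn ms.1 low)).map Prod.snd
     if matched = [] then (4 : Int)
     else (PySem.List.max? matched (fun y => y)).getD 0) = firstHit l low := by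
  simp only [PySem.Str.isIn] at *
  induction l with
  | nil => simp [firstHit]
  | cons x t ih =>
    rcases List.pairwise_cons.mp hs with ⟨hx, ht⟩
    simp only [List.filter_cons, firstHit, PySem.Str.isIn]
    by_cases h : PySem.Chars.isIn x.1.toList low.toList = true
    · simp only [h, if_true, List.map_cons]
      rw [if_neg (by simp), PySem.List.max?_id_cons,
          foldl_max_of_le x.2 _ (by
            intro y hy
            rcases List.mem_map.mp hy with ⟨ms, hms, rfl⟩
            exact hx ms (List.mem_of_mem_filter hms))]
      rfl
    · simp only [h, if_false, Bool.false_eq_true]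
      exact ih ht

-- Merging consecutive branches with the same value into one or-test.
theorem if_or {v X : Int} (a b : Bool) :
    (if a then v else if b then v else X) = (if (a || b) then v else X) := by
  cases a <;> cases b <;> simp

-- The first hit on the score-sorted keyword list is B's tier cascade.
theorem firstHit_eq_cascade (low : String) :
    firstHit PACKAGING_SCORES low =
      (if PySem.Str.isIn "glass" low || PySem.Str.isIn "metal" low || PySem.Str.isIn "aluminum" low then 10
       else if PySem.Str.isIn "paper" low || PySem.Str.isIn "cardboard" low then 8
       else if PySem.Str.isIn "carton" low then 7
       else if PySem.Str.isIn "minimal plastic" low then 6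
       else if PySem.Str.isIn "recyclable plastic" low || PySem.Str.isIn "bioplastic" low then 5
       else if PySem.Str.isIn "plastic" low || PySem.Str.isIn "mixed materials" low then 3
       else if PySem.Str.isIn "polystyrene" low || PySem.Str.isIn "styrofoam" low then 1
       else 4) := by
  simp only [PACKAGING_SCORES, firstHit]
  simp only [if_or, Bool.or_assoc]

-- ===== VERDICT (by name: the statement is the Claim_ definition above) =====
theorem score_packaging_spec : Claim_equal_score_packaging := by
  intro s _
  unfold Spec_score_packaging score_packaging score_packaging_alt DEFAULT_PACKAGING_SCORE
  by_cases hs : s = ""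
  · simp [hs]
  · simp only [hs, if_false]
    rw [matched_eq, List.nil_append]
    have h1 := key_lemma (PySem.Str.lower s) PACKAGING_SCORES (by decide)
    have h2 := firstHit_eq_cascade (PySem.Str.lower s)
    simp only [PACKAGING_SCORES] at h1 h2 ⊢
    rw [h1, h2]
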